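-- pv_equiv track=rewrite | github.com/athill01/comp110-23f-workspace | exercises/DRM_Encryption.py | num_value
-- ===== SOURCE A (Python) =====
-- def num_value(x: list[str]) -> list[int]:
--     new_list = []
--     first_value = 0
--     second_value = 0
--     for i in x:
--         if i == x[0]:
--             for y in range(0, len(i)):
--                 first_value += ord(i[y]) - 65
--         else:
--             for y in range(0, len(i)):
--                 second_value += ord(i[y]) - 65
--     new_list.append(first_value)
--     new_list.append(second_value)
--     return new_list
-- ===== SOURCE B (Python) =====
-- def num_value(x: list[str]) -> list[int]:
--     total = sum(ord(c) - 65 for s in x for c in s)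
--     first = sum(ord(c) - 65 for s in x if s == x[0] for c in s)
--     return [first, total - first]
-- ===== Notes on version B (the rewrite author's own statement) =====
-- stated objective: alternative
-- what changed: B replaces A's single loop with two running accumulators by two sum-comprehensions: a grand total and the first bucket, obtaining the second bucket by complement subtraction (total - first).
import Mathlib
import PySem

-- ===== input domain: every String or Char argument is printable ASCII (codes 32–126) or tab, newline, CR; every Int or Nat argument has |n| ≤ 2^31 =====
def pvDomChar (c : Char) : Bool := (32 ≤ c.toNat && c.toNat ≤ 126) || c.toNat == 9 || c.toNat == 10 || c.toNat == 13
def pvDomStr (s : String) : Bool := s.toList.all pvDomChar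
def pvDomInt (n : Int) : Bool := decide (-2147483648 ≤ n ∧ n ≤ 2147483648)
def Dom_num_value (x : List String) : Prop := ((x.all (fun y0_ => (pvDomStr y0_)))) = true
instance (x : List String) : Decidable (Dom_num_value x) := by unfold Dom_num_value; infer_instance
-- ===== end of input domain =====

-- B computes each bucket by a whole-list comprehension and derives the second bucket by
-- complement subtraction instead of A's single loop with two running accumulators.
-- ===== PORT A =====
-- inner 'for y in range(0, len(i)): acc += ord(i[y]) - 65' (x[0] only read inside the loop, so headD "" is never the compared value on empty x)
def charLoopA (s : String) (acc : Int) : Int :=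
  s.toList.foldl (fun a c => a + ((c.toNat : Int) - 65)) acc

def num_value (x : List String) : List Int :=
  let st := x.foldl (fun (st : Int × Int) i =>
    if i = x.headD "" then (charLoopA i st.1, st.2) else (st.1, charLoopA i st.2)) (0, 0)
  [st.1, st.2]

-- ===== PORT B =====
def strSumB (s : String) : Int := (s.toList.map (fun c => (c.toNat : Int) - 65)).sum

def num_value_alt (x : List String) : List Int :=
  let total := (x.map strSumB).sum
  let first := ((x.filter (fun s => s = x.headD "")).map strSumB).sum
  [first, total - first]

-- ===== PRECONDITION & SPEC =====
def Spec_num_value (x : List String) (out : List Int) : Prop := out = num_value_alt x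
instance (x : List String) (out : List Int) : Decidable (Spec_num_value x out) := by unfold Spec_num_value; infer_instance

-- ===== CLAIM (what is proved, stated in full; the proofs are below) =====
def Claim_equal_num_value : Prop := ∀ (x : List String), Dom_num_value x → Spec_num_value x (num_value x)

-- ===== LEMMAS AND PROOFS =====
theorem charLoopA_eq (s : String) (acc : Int) : charLoopA s acc = acc + strSumB s := by
  unfold charLoopA strSumB
  induction s.toList generalizing acc with
  | nil => simp
  | cons c cs ih => simp [List.foldl, ih]; ring

theorem loopA_eq (l : List String) (h : String) (a b : Int) :
    l.foldl (fun (st : Int × Int) i =>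
      if i = h then (charLoopA i st.1, st.2) else (st.1, charLoopA i st.2)) (a, b)
    = (a + ((l.filter (fun s => s = h)).map strSumB).sum,
       b + (l.map strSumB).sum - ((l.filter (fun s => s = h)).map strSumB).sum) := by
  induction l generalizing a b with
  | nil => simp
  | cons s l ih =>
    simp only [List.foldl_cons]
    by_cases hs : s = h
    · rw [if_pos hs, charLoopA_eq, ih]
      simp [hs]
      constructor <;> ring
    · rw [if_neg hs, charLoopA_eq, ih]
      simp [hs]
      ring

-- ===== VERDICT (by name: the statement is the Claim_ definition above) =====
theorem num_value_spec : Claim_equal_num_value := by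
  intro x _
  unfold Spec_num_value num_value num_value_alt
  simp [loopA_eq]
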